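-- pv_equiv track=rewrite | github.com/pyhoneybot/honeybot | honeybot/plugins/pluginInfo.py | docFind
-- ===== SOURCE A (Python) =====
-- def docFind(lines, att):
--     hit = False
--
--     for line in lines.splitlines():
--
--         if hit:
--             auth = str(line)
--             auth = auth.strip()
--             return auth
--
--         if line == f"[{att}]":
--             hit = True
--
--     return f"Unknown {att}"
-- ===== SOURCE B (Python) =====
-- def docFind(lines, att):
--     ll = lines.splitlines()
--     # index: header line -> following line; inserted back-to-front so the
--     # FIRST occurrence of a duplicate header wins, matching a forward scan
--     nxt = {}
--     for prev, cur in reversed(list(zip(ll, ll[1:]))):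
--         nxt[prev] = cur
--     cur = nxt.get(f"[{att}]")
--     return cur.strip() if cur is not None else f"Unknown {att}"
-- ===== Notes on version B (the rewrite author's own statement) =====
-- stated objective: alternative
-- what changed: Replaces the stateful hit-flag scan with a precomputed dictionary index from each line to its successor (built back-to-front so the first duplicate header wins), answered by a single O(1) lookup instead of a search loop.
import Mathlib
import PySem

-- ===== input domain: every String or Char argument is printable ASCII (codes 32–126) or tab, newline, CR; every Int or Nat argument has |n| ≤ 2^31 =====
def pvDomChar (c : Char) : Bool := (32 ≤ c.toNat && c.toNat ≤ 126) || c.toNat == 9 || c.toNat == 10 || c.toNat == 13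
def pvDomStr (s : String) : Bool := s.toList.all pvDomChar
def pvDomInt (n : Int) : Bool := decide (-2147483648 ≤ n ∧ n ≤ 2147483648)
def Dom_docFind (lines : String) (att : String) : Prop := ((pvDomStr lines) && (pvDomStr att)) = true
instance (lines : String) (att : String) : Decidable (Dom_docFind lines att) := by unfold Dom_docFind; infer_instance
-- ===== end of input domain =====

-- B replaces A's stateful hit-flag scan with a precomputed successor dictionary (built back-to-front so the first duplicate header wins) answered by one lookup; objective: alternative.


-- ===== PORT A =====
-- the for-loop with its `hit` flag, early return included
def docFindGoA (header att : String) : List String → Bool → String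
  | [], _ => "Unknown " ++ att
  | l :: ls, hit => if hit then PySem.Str.strip l else docFindGoA header att ls (l == header)

def docFind (lines : String) (att : String) : String :=
  docFindGoA ("[" ++ att ++ "]") att (PySem.Str.splitlines lines) false

-- ===== PORT B =====
-- the index-building loop over reversed(list(zip(ll, ll[1:])))
def docFindBuild (ll : List String) : PySem.Dict String String :=
  ((ll.zip (PySem.List.slice ll (some 1) none)).reverse).foldl
    (fun d (p : String × String) => d.insert p.1 p.2) PySem.Dict.empty

def docFind_alt (lines : String) (att : String) : String :=
  let ll := PySem.Str.splitlines lines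
  match (docFindBuild ll).get? ("[" ++ att ++ "]") with
  | some cur => PySem.Str.strip cur
  | none => "Unknown " ++ att

-- ===== PRECONDITION & SPEC =====
def Spec_docFind (lines : String) (att : String) (out : String) : Prop := out = docFind_alt lines att
instance (lines : String) (att : String) (out : String) : Decidable (Spec_docFind lines att out) := by unfold Spec_docFind; infer_instance

-- ===== CLAIM (what is proved, stated in full; the proofs are below) =====
def Claim_equal_docFind : Prop := ∀ (lines : String) (att : String), Dom_docFind lines att → Spec_docFind lines att (docFind lines att)

-- ===== LEMMAS AND PROOFS =====

-- first-match association lookup over adjacent pairs: the meeting point of the two algorithms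
def lookupFirst (header : String) : List (String × String) → Option String
  | [] => none
  | (p, c) :: rest => if p == header then some c else lookupFirst header rest

-- A's flag scan computes the first-match pairwise lookup (stripped), Unknown if none
theorem goA_eq_lookupFirst (header att : String) : ∀ ls : List String,
    docFindGoA header att ls false =
      (match lookupFirst header (ls.zip ls.tail) with
       | some c => PySem.Str.strip c
       | none => "Unknown " ++ att) := by
  intro ls
  induction ls with
  | nil => rfl
  | cons x ls ih =>
    cases ls with
    | nil => simp [docFindGoA, lookupFirst]
    | cons y ls' =>
      by_cases h : x == header
      · simp [docFindGoA, lookupFirst, h]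
      · have hx : (x == header) = false := by simpa using h
        show docFindGoA header att (y :: ls') (x == header) = _
        rw [hx]
        simpa [lookupFirst, hx, List.zip] using ih

-- building a dict by inserting a pair list BACK-TO-FRONT makes get? the FIRST match
theorem get?_foldl_reverse_insert (k : String) : ∀ ps : List (String × String),
    (ps.reverse.foldl (fun d (p : String × String) => d.insert p.1 p.2) PySem.Dict.empty).get? k
      = lookupFirst k ps := by
  intro ps
  induction ps with
  | nil => simp [lookupFirst, PySem.Dict.get?_empty]
  | cons q ps ih =>
    rw [List.reverse_cons, List.foldl_append]
    simp only [List.foldl_cons, List.foldl_nil]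
    rw [PySem.Dict.get?_insert]
    obtain ⟨p, c⟩ := q
    simp only [lookupFirst]
    by_cases h : k = p
    · simp [h]
    · have hb : (p == k) = false := beq_eq_false_iff_ne.mpr (Ne.symm h)
      rw [if_neg h, ih]
      simp [hb]

-- zip with the slice-tail is zip with the tail
theorem build_eq_reverse_fold (ll : List String) :
    docFindBuild ll =
      ((ll.zip ll.tail).reverse.foldl (fun d (p : String × String) => d.insert p.1 p.2)
        PySem.Dict.empty) := by
  unfold docFindBuild
  simp [PySem.List.slice_from]

theorem docFind_spec' : ∀ (lines att : String), docFind lines att = docFind_alt lines att := by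
  intro lines att
  unfold docFind docFind_alt
  simp only [goA_eq_lookupFirst, build_eq_reverse_fold, get?_foldl_reverse_insert]

-- ===== VERDICT (by name: the statement is the Claim_ definition above) =====
theorem docFind_spec : Claim_equal_docFind := by
  intro lines att _
  exact docFind_spec' lines att
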